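-- pv_equiv track=rewrite | github.com/ponktacology/wdi | rekurencja_to_chuj5.py | is_equal_weight
-- ===== SOURCE A (Python) =====
-- def count_vowels(s):
--     vowels = ['a', 'e', 'i', 'o', 'u', 'y']
--     result = 0
--     for i in range(len(s)):
--         if s[i] in vowels:
--             result += 1
--     return result
--
-- def is_equal_weight(s1, s2):
--     if count_vowels(s1) != count_vowels(s2):
--         return False
--
--     as1 = 0
--     as2 = 0
--
--     for i in range(len(s1)):
--         as1 += ord(s1[i])
--     for i in range(len(s2)):
--         as2 += ord(s2[i])
--
--     return as1 == as2
-- ===== SOURCE B (Python) =====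
-- def _profile(s):
--     freq = {}
--     for ch in s:
--         freq[ch] = freq.get(ch, 0) + 1
--     vowels = 0
--     total = 0
--     for ch, n in freq.items():
--         if ch in 'aeiouy':
--             vowels += n
--         total += ord(ch) * n
--     return (vowels, total)
--
-- def is_equal_weight(s1, s2):
--     return _profile(s1) == _profile(s2)
-- ===== Notes on version B (the rewrite author's own statement) =====
-- stated objective: faster
-- what changed: B builds a character-frequency dictionary per string and derives the vowel count and code sum as count-weighted sums over the distinct characters, comparing the two (vowels, sum) profiles, instead of A's four positional scans (two list-membership vowel counts plus two ord loops) with an early return.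
import Mathlib
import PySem

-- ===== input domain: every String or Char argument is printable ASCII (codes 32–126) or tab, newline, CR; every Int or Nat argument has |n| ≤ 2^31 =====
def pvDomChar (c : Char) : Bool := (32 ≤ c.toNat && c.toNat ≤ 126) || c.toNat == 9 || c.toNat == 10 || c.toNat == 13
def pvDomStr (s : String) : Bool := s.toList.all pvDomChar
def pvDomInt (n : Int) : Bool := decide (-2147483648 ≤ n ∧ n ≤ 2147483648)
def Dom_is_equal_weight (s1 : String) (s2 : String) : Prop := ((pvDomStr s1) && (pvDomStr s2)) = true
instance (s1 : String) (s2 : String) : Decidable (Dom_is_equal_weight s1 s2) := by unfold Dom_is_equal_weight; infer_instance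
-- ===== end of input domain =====

-- B builds a character-frequency dictionary per string and derives both aggregates (vowel count, code sum)
-- from the distinct characters' entries, instead of A's positional scans; objective: alternative.

-- ===== PORT A =====
-- count_vowels: loop over the characters, +1 when the character is in the vowel list
def count_vowels (s : String) : Int :=
  s.toList.foldl (fun result c =>
    if c ∈ ['a', 'e', 'i', 'o', 'u', 'y'] then result + 1 else result) 0

def is_equal_weight (s1 : String) (s2 : String) : Bool :=
  if count_vowels s1 ≠ count_vowels s2 then false
  else
    let as1 : Int := s1.toList.foldl (fun a c => a + (c.toNat : Int)) 0
    let as2 : Int := s2.toList.foldl (fun a c => a + (c.toNat : Int)) 0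
    as1 == as2

-- ===== PORT B =====
-- _profile: one pass building a char → count dict, then one pass over its (distinct-key) items
def profile (s : String) : Int × Int :=
  let freq : PySem.Dict Char Int :=
    s.toList.foldl (fun d ch => d.insert ch (d.getD ch 0 + 1)) PySem.Dict.empty
  freq.items.foldl (fun (p : Int × Int) kv =>
    ((if kv.1 ∈ "aeiouy".toList then p.1 + kv.2 else p.1), p.2 + (kv.1.toNat : Int) * kv.2))
    (0, 0)

def is_equal_weight_alt (s1 : String) (s2 : String) : Bool :=
  profile s1 == profile s2

-- ===== PRECONDITION & SPEC =====
def Spec_is_equal_weight (s1 : String) (s2 : String) (out : Bool) : Prop := out = is_equal_weight_alt s1 s2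
instance (s1 : String) (s2 : String) (out : Bool) : Decidable (Spec_is_equal_weight s1 s2 out) := by unfold Spec_is_equal_weight; infer_instance

-- ===== CLAIM (what is proved, stated in full; the proofs are below) =====
def Claim_equal_is_equal_weight : Prop := ∀ (s1 : String) (s2 : String), Dom_is_equal_weight s1 s2 → Spec_is_equal_weight s1 s2 (is_equal_weight s1 s2)

-- ===== LEMMAS AND PROOFS =====

-- B's fused fold over the items splits into the two count-weighted sums
theorem fold_pair (items : List (Char × Int)) (v t : Int) :
    items.foldl (fun (p : Int × Int) kv =>
      ((if kv.1 ∈ "aeiouy".toList then p.1 + kv.2 else p.1), p.2 + (kv.1.toNat : Int) * kv.2)) (v, t)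
    = (v + (items.map (fun kv => if kv.1 ∈ "aeiouy".toList then kv.2 else 0)).sum,
       t + (items.map (fun kv => (kv.1.toNat : Int) * kv.2)).sum) := by
  induction items generalizing v t with
  | nil => simp
  | cons kv rest ih =>
    simp only [List.foldl_cons, List.map_cons, List.sum_cons]
    rw [ih, Prod.mk.injEq]
    constructor
    · split_ifs <;> ring
    · ring

-- a sum of an indicator over a nodup list containing c picks out f c
theorem sum_pick (f : Char → Int) (c : Char) :
    ∀ (d : List Char), d.Nodup → c ∈ d →
      (d.map (fun k => if k = c then f k else 0)).sum = f c := by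
  intro d
  induction d with
  | nil => simp
  | cons k rest ih =>
    intro hnd hmem
    have hnd' := List.nodup_cons.mp hnd
    simp only [List.map_cons, List.sum_cons]
    by_cases hk : k = c
    · subst hk
      have : (rest.map (fun x => if x = k then f x else 0)).sum = 0 := by
        have : ∀ x ∈ rest, (if x = k then f x else 0) = 0 := by
          intro x hx
          have : x ≠ k := fun he => hnd'.1 (he ▸ hx)
          simp [this]
        calc (rest.map (fun x => if x = k then f x else 0)).sum
            = (rest.map (fun _ => (0 : Int))).sum := by
              rw [List.map_congr_left this]
          _ = 0 := by simp
      simp [this]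
    · rcases List.mem_cons.mp hmem with h | h
      · exact absurd h.symm hk
      · simp [hk, ih hnd'.2 h]

-- count-weighted sum over any nodup superlist of l's support = plain sum over l
theorem sum_weighted (f : Char → Int) :
    ∀ (l d : List Char), d.Nodup → (∀ c ∈ l, c ∈ d) →
      (d.map (fun k => f k * (l.count k : Int))).sum = (l.map f).sum := by
  intro l
  induction l with
  | nil => intro d _ _; simp
  | cons c rest ih =>
    intro d hnd hsub
    have hmem : c ∈ d := hsub c (List.mem_cons_self)
    have hstep : ∀ k, ((c :: rest).count k : Int)
        = (rest.count k : Int) + (if k = c then 1 else 0) := by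
      intro k
      by_cases hk : k = c
      · simp [hk]
      · have hck : ¬c = k := fun he => hk he.symm
        simp [hk, hck]
    have hfun : (fun k => f k * ((c :: rest).count k : Int))
        = fun k => f k * (rest.count k : Int) + (if k = c then f k else 0) := by
      funext k
      rw [hstep k]
      split_ifs <;> ring
    rw [hfun]
    have hsplit : (d.map (fun k => f k * (rest.count k : Int) + (if k = c then f k else 0))).sum
        = (d.map (fun k => f k * (rest.count k : Int))).sum
          + (d.map (fun k => if k = c then f k else 0)).sum := by
      simp [← List.sum_map_add]
    rw [hsplit, ih d hnd (fun x hx => hsub x (List.mem_cons_of_mem _ hx)),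
        sum_pick f c d hnd hmem]
    simp [add_comm]

-- A's two loops as sums
theorem count_vowels_eq (s : String) :
    count_vowels s = (s.toList.map (fun c => if c ∈ "aeiouy".toList then (1 : Int) else 0)).sum := by
  unfold count_vowels
  have hv : "aeiouy".toList = ['a', 'e', 'i', 'o', 'u', 'y'] := by decide
  rw [hv]
  induction s.toList using List.reverseRecOn with
  | nil => simp
  | append_singleton rest c ih =>
    rw [List.foldl_append, List.map_append, List.sum_append, ih]
    simp only [List.foldl_cons, List.foldl_nil, List.map_cons, List.map_nil, List.sum_cons,
      List.sum_nil]
    split_ifs <;> ring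

theorem ord_sum_eq (l : List Char) (a : Int) :
    l.foldl (fun a c => a + (c.toNat : Int)) a = a + (l.map (fun c => (c.toNat : Int))).sum := by
  exact PySem.List.foldl_add l _ a

-- B's profile equals A's two aggregates
theorem profile_eq (s : String) :
    profile s = (count_vowels s, (s.toList.map (fun c => (c.toNat : Int))).sum) := by
  have hp : profile s = (PySem.Dict.counter s.toList).items.foldl
      (fun (p : Int × Int) kv =>
        ((if kv.1 ∈ "aeiouy".toList then p.1 + kv.2 else p.1), p.2 + (kv.1.toNat : Int) * kv.2))
      (0, 0) := rfl
  rw [hp, PySem.Dict.items_counter, fold_pair]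
  simp only [List.map_map, zero_add]
  have hnd := PySem.Set.nodup_ofList (xs := s.toList)
  have hsub : ∀ c ∈ s.toList, c ∈ PySem.Set.ofList s.toList := by
    intro c hc; exact (PySem.Set.mem_ofList _ _).mpr hc
  have h1 : ((PySem.Set.ofList s.toList).map
      ((fun kv : Char × Int => if kv.1 ∈ "aeiouy".toList then kv.2 else 0) ∘
        fun k => (k, (s.toList.count k : Int)))).sum
      = (s.toList.map (fun c => if c ∈ "aeiouy".toList then (1 : Int) else 0)).sum := by
    have hf : ((fun kv : Char × Int => if kv.1 ∈ "aeiouy".toList then kv.2 else 0) ∘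
        fun k => (k, (s.toList.count k : Int)))
        = fun k => (if k ∈ "aeiouy".toList then (1 : Int) else 0) * (s.toList.count k : Int) := by
      funext k
      simp only [Function.comp_apply]
      split_ifs with h
      · simp
      · simp
    rw [hf, sum_weighted _ s.toList _ hnd hsub]
  have h2 : ((PySem.Set.ofList s.toList).map
      ((fun kv : Char × Int => (kv.1.toNat : Int) * kv.2) ∘
        fun k => (k, (s.toList.count k : Int)))).sum
      = (s.toList.map (fun c => (c.toNat : Int))).sum := by
    have hf : ((fun kv : Char × Int => (kv.1.toNat : Int) * kv.2) ∘
        fun k => (k, (s.toList.count k : Int)))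
        = fun k => (fun c => (c.toNat : Int)) k * (s.toList.count k : Int) := rfl
    rw [hf, sum_weighted _ s.toList _ hnd hsub]
  rw [h1, h2, count_vowels_eq]

-- ===== VERDICT (by name: the statement is the Claim_ definition above) =====
theorem is_equal_weight_spec : Claim_equal_is_equal_weight := by
  intro s1 s2 _
  unfold Spec_is_equal_weight is_equal_weight is_equal_weight_alt
  rw [profile_eq, profile_eq, ord_sum_eq, ord_sum_eq]
  by_cases h : count_vowels s1 = count_vowels s2 <;>
    simp [h, Prod.ext_iff]
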